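-- pv_equiv track=rewrite | github.com/getachew67/CSE-160 | Final Exam/final_21au.py | never_win
-- ===== SOURCE A (Python) =====
-- def never_win(match_tuples):
--     '''
--     Arguments:
--         match_tuples: a list of tuples that are size 2 representing matches
--         played. Each tuple is in the form (string, boolean), which represents
--         the champion played for the match and whether the match was won
--         (True for won, False for lost). Assume match_tuples is not empty.
--
--     Returns: a list of the unique champions that have no matches won in
--         match_tuples, sorted in alphabetical order. Returns an empty list if
--         there are no champions with zero matches won.
--     '''
--     # your solution code should start here
--     winners = set()
--     all_champs = set()
--     for i in match_tuples:
--         all_champs.add(i[0])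
--         if i[1] is True:
--             winners.add(i[0])
--     zero_won = sorted(list(set((all_champs - winners))))
--     return zero_won
-- ===== SOURCE B (Python) =====
-- def never_win(match_tuples):
--     # Sort the matches by champion name, then scan once over the sorted list:
--     # each run of consecutive equal champions is one champion; emit it if the
--     # run contains no won match. Output comes out already in alphabetical order.
--     ms = sorted(match_tuples, key=lambda t: t[0])
--     out = []
--     i = 0
--     n = len(ms)
--     while i < n:
--         champ = ms[i][0]
--         won = False
--         while i < n and ms[i][0] == champ:
--             if ms[i][1] is True:
--                 won = True
--             i += 1
--         if not won:
--             out.append(champ)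
--     return out
-- ===== Notes on version B (the rewrite author's own statement) =====
-- stated objective: alternative
-- what changed: Replaces A's two hash sets plus set-difference plus final sort by sorting the match list by champion first and doing a single run-grouping scan over the sorted list that emits each champion with no won match directly in alphabetical order.
import Mathlib
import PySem

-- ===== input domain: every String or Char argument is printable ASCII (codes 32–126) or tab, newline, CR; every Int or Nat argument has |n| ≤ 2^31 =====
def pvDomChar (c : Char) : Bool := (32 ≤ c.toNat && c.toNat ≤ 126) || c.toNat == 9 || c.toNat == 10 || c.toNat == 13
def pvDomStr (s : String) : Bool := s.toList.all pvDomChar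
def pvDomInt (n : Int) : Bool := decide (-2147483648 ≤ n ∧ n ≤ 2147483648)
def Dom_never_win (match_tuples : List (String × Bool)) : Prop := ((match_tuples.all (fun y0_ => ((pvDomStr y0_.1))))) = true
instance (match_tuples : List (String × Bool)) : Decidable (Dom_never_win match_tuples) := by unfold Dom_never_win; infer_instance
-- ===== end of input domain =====

-- B replaces A's two hash sets + set difference + final sort by sorting the matches by
-- champion and one run-grouping scan over the sorted list (objective: alternative).

-- ===== PORT A =====
def never_win (match_tuples : List (String × Bool)) : List String :=
  let st := match_tuples.foldl
    (fun (st : PySem.Set String × PySem.Set String) i =>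
      ((if i.2 = true then PySem.Set.add st.1 i.1 else st.1), PySem.Set.add st.2 i.1))
    (PySem.Set.empty, PySem.Set.empty)
  PySem.List.sorted (PySem.Set.ofList (PySem.Set.diff st.2 st.1)) (fun x => x)

-- ===== PORT B =====
-- the outer while loop of Source B: one step consumes the run of the head champion
def nwScan : List (String × Bool) → List String
  | [] => []
  | (c, w) :: t =>
      let run := t.takeWhile (fun p => p.1 == c)
      let rest := t.dropWhile (fun p => p.1 == c)
      let won := w || run.any (fun p => p.2)
      if won then nwScan rest else c :: nwScan rest
termination_by l => l.length
decreasing_by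
  all_goals simp only [List.length_cons]
  all_goals exact Nat.lt_succ_of_le (List.length_dropWhile_le _ _)

def never_win_alt (match_tuples : List (String × Bool)) : List String :=
  nwScan (PySem.List.sorted match_tuples (fun t => t.1))

-- ===== PRECONDITION & SPEC =====
def Spec_never_win (match_tuples : List (String × Bool)) (out : List String) : Prop := out = never_win_alt match_tuples
instance (match_tuples : List (String × Bool)) (out : List String) : Decidable (Spec_never_win match_tuples out) := by unfold Spec_never_win; infer_instance

-- ===== CLAIM (what is proved, stated in full; the proofs are below) =====
def Claim_equal_never_win : Prop := ∀ (match_tuples : List (String × Bool)), Dom_never_win match_tuples → Spec_never_win match_tuples (never_win match_tuples)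

-- ===== LEMMAS AND PROOFS =====

-- membership in A's two accumulated sets
lemma nw_fold_mem (l : List (String × Bool)) (W A : PySem.Set String) :
    (∀ x, x ∈ (l.foldl (fun (st : PySem.Set String × PySem.Set String) i =>
        ((if i.2 = true then PySem.Set.add st.1 i.1 else st.1), PySem.Set.add st.2 i.1)) (W, A)).1
      ↔ x ∈ W ∨ (x, true) ∈ l) ∧
    (∀ x, x ∈ (l.foldl (fun (st : PySem.Set String × PySem.Set String) i =>
        ((if i.2 = true then PySem.Set.add st.1 i.1 else st.1), PySem.Set.add st.2 i.1)) (W, A)).2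
      ↔ x ∈ A ∨ ∃ w, (x, w) ∈ l) := by
  induction l generalizing W A with
  | nil => simp
  | cons h t ih =>
    obtain ⟨c, w⟩ := h
    simp only [List.foldl_cons]
    obtain ⟨ih1, ih2⟩ := ih (if w = true then PySem.Set.add W c else W) (PySem.Set.add A c)
    constructor
    · intro x
      rw [ih1]
      cases w
      · simp [PySem.Set.mem_add]
      · simp [PySem.Set.mem_add]
        tauto
    · intro x
      rw [ih2]
      simp only [PySem.Set.mem_add, List.mem_cons, Prod.mk.injEq]
      constructor
      · rintro (((h | rfl) | ⟨v, hv⟩))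
        · exact Or.inl h
        · exact Or.inr ⟨w, Or.inl ⟨rfl, rfl⟩⟩
        · exact Or.inr ⟨v, Or.inr hv⟩
      · rintro (h | ⟨v, (⟨rfl, rfl⟩ | hv)⟩)
        · exact Or.inl (Or.inl h)
        · exact Or.inl (Or.inr rfl)
        · exact Or.inr ⟨v, hv⟩

-- keys strictly above c after dropping the c-run, on a key-sorted list
lemma nw_drop_gt (c : String) (t : List (String × Bool))
    (hs : t.Pairwise (fun a b => a.1 ≤ b.1)) (hb : ∀ p ∈ t, c ≤ p.1) :
    ∀ p ∈ t.dropWhile (fun p => p.1 == c), c < p.1 := by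
  induction t with
  | nil => simp
  | cons h t ih =>
    by_cases hc : h.1 = c
    · rw [List.dropWhile_cons_of_pos (by simp [hc])]
      exact ih (List.Pairwise.of_cons hs) (fun p hp => hb p (List.mem_cons_of_mem _ hp))
    · rw [List.dropWhile_cons_of_neg (by simp [hc])]
      intro p hp
      have hch : c < h.1 := lt_of_le_of_ne (hb h (List.mem_cons_self)) (Ne.symm hc)
      rcases List.mem_cons.mp hp with rfl | hp
      · exact hch
      · exact lt_of_lt_of_le hch ((List.pairwise_cons.mp hs).1 p hp)

-- keys equal to c inside the c-run
lemma nw_take_key (c : String) (t : List (String × Bool)) :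
    ∀ p ∈ t.takeWhile (fun p => p.1 == c), p.1 = c := by
  intro p hp
  have := List.mem_takeWhile_imp hp
  simpa using this

-- the cons step of B's scan: one run consumed
lemma nw_scan_cons (c : String) (w : Bool) (t : List (String × Bool))
    (hs : ((c, w) :: t).Pairwise (fun a b => a.1 ≤ b.1))
    (ihm : ∀ x, x ∈ nwScan (t.dropWhile (fun p => p.1 == c)) ↔
      (∃ v, (x, v) ∈ t.dropWhile (fun p => p.1 == c)) ∧ (x, true) ∉ t.dropWhile (fun p => p.1 == c))
    (ihp : (nwScan (t.dropWhile (fun p => p.1 == c))).Pairwise (· < ·)) :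
    (∀ x, x ∈ (if (w || (t.takeWhile (fun p => p.1 == c)).any (fun p => p.2))
        then nwScan (t.dropWhile (fun p => p.1 == c))
        else c :: nwScan (t.dropWhile (fun p => p.1 == c))) ↔
      (∃ v, (x, v) ∈ (c, w) :: t) ∧ (x, true) ∉ (c, w) :: t) ∧
    ((if (w || (t.takeWhile (fun p => p.1 == c)).any (fun p => p.2))
        then nwScan (t.dropWhile (fun p => p.1 == c))
        else c :: nwScan (t.dropWhile (fun p => p.1 == c)))).Pairwise (· < ·) := by
  set run := t.takeWhile (fun p => p.1 == c) with hrundef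
  set rest := t.dropWhile (fun p => p.1 == c) with hrestdef
  set won := w || run.any (fun p => p.2) with hwondef
  have hbd : ∀ p ∈ t, c ≤ p.1 := (List.pairwise_cons.mp hs).1
  have hgt : ∀ p ∈ rest, c < p.1 := nw_drop_gt c t (List.Pairwise.of_cons hs) hbd
  have hsplit : t = run ++ rest := (List.takeWhile_append_dropWhile).symm
  have hmem : ∀ (x : String) (b : Bool),
      (x, b) ∈ (c, w) :: t ↔ ((x, b) = (c, w) ∨ (x, b) ∈ run) ∨ (x, b) ∈ rest := by
    intro x b
    rw [hsplit]
    simp [or_assoc]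
  have hrun : ∀ p ∈ run, p.1 = c := nw_take_key c t
  have hwon : won = true ↔ (c, true) ∈ (c, w) :: t := by
    rw [hwondef, hmem c true]
    constructor
    · intro h
      rw [Bool.or_eq_true] at h
      rcases h with hw | hany
      · exact Or.inl (Or.inl (by rw [hw]))
      · rw [List.any_eq_true] at hany
        obtain ⟨p, hp, h2⟩ := hany
        have h1 : p.1 = c := hrun p hp
        obtain ⟨p1, p2⟩ := p
        have h2' : p2 = true := h2
        have h1' : p1 = c := h1
        subst h2'; subst h1'
        exact Or.inl (Or.inr hp)
    · intro h
      rw [Bool.or_eq_true]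
      rcases h with (h | h) | h
      · injection h with _ h2
        exact Or.inl h2.symm
      · exact Or.inr (List.any_eq_true.mpr ⟨(c, true), h, rfl⟩)
      · exact absurd (hgt _ h) (by simp)
  constructor
  · intro x
    by_cases hx : x = c
    · subst hx
      have hnr : x ∉ nwScan rest := by
        rw [ihm]
        rintro ⟨⟨v, hv⟩, -⟩
        exact absurd (hgt _ hv) (by simp)
      by_cases hw : won = true
      · simp only [if_pos hw, iff_false_intro hnr, false_iff]
        rintro ⟨-, hnt⟩
        exact hnt (hwon.mp hw)
      · rw [if_neg hw]
        constructor
        · intro _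
          exact ⟨⟨w, List.mem_cons_self⟩, fun hc => hw (hwon.mpr hc)⟩
        · intro _
          exact List.mem_cons_self
    · have hstep : x ∈ (if won then nwScan rest else c :: nwScan rest) ↔ x ∈ nwScan rest := by
        split <;> simp [hx]
      rw [hstep, ihm]
      have h1 : ∀ b, (x, b) ∈ (c, w) :: t ↔ (x, b) ∈ rest := by
        intro b
        rw [hmem]
        constructor
        · rintro (h | h)
          · rcases h with h | h
            · exact absurd (congrArg Prod.fst h) hx
            · exact absurd (hrun _ h) hx
          · exact h
        · exact Or.inr
      constructor
      · rintro ⟨⟨v, hv⟩, hn⟩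
        exact ⟨⟨v, (h1 v).mpr hv⟩, fun hc => hn ((h1 true).mp hc)⟩
      · rintro ⟨⟨v, hv⟩, hn⟩
        exact ⟨⟨v, (h1 v).mp hv⟩, fun hc => hn ((h1 true).mpr hc)⟩
  · split
    · exact ihp
    · refine List.pairwise_cons.mpr ⟨?_, ihp⟩
      intro x hx
      obtain ⟨⟨v, hv⟩, -⟩ := (ihm x).mp hx
      exact hgt _ hv

-- characterisation of B's scan on a key-sorted list
lemma nw_scan_spec : ∀ l : List (String × Bool), l.Pairwise (fun a b => a.1 ≤ b.1) →
    (∀ x, x ∈ nwScan l ↔ (∃ v, (x, v) ∈ l) ∧ (x, true) ∉ l) ∧ (nwScan l).Pairwise (· < ·) := by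
  intro l
  induction l using nwScan.induct with
  | case1 => intro _; simp [nwScan]
  | case2 c w t run rest won hwon ih =>
    intro hs
    have hrest := ih ((List.Pairwise.of_cons hs).sublist (List.dropWhile_sublist _))
    simp only [nwScan]
    exact nw_scan_cons c w t hs hrest.1 hrest.2
  | case3 c w t run rest won hwon ih =>
    intro hs
    have hrest := ih ((List.Pairwise.of_cons hs).sublist (List.dropWhile_sublist _))
    simp only [nwScan]
    exact nw_scan_cons c w t hs hrest.1 hrest.2

-- ===== VERDICT (by name: the statement is the Claim_ definition above) =====
theorem never_win_spec : Claim_equal_never_win := by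
  intro mt _
  unfold Spec_never_win never_win never_win_alt
  have hperm : (PySem.List.sorted mt (fun t => t.1)).Perm mt := PySem.List.sorted_perm mt (fun t => t.1) false
  have hsorted : (PySem.List.sorted mt (fun t => t.1)).Pairwise (fun a b => a.1 ≤ b.1) :=
    PySem.List.sorted_pairwise _ _
  obtain ⟨hm, hp⟩ := nw_scan_spec _ hsorted
  refine PySem.List.sorted_eq_of_perm_of_pairwise_lt _ _ _ ?_ hp
  obtain ⟨hf1, hf2⟩ := nw_fold_mem mt PySem.Set.empty PySem.Set.empty
  rw [List.perm_ext_iff_of_nodup (List.Pairwise.nodup hp) (PySem.Set.nodup_ofList _)]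
  intro x
  rw [hm x, PySem.Set.mem_ofList, PySem.Set.mem_diff, hf1 x, hf2 x]
  have hx : ∀ (b : Bool), (x, b) ∈ PySem.List.sorted mt (fun t => t.1) ↔ (x, b) ∈ mt :=
    fun b => hperm.mem_iff
  simp only [PySem.Set.empty, List.not_mem_nil, false_or, hx]
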